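-- pv_equiv track=rewrite | github.com/amaiaDi/POO_Proyecto_BikeParking_POO-BD_Josu_G2 | src/data_utils/validators.py | es_email_unico
-- ===== SOURCE A (Python) =====
-- def es_email_unico(p_uniemail: str, plista_usuarios: set | list) -> bool:
--     """
--     Devuelve True si 'email' no existe en la colección 'emails_existentes'.
--     La colección puede ser una lista o un set.
--     """
--
--     email_normalizado = p_uniemail.strip().lower()
--     emails_existentes = {
--         u.get("email", "").strip().lower()
--         for u in plista_usuarios
--         if "email" in u and u["email"]
--     }
--     return email_normalizado not in emails_existentes
-- ===== SOURCE B (Python) =====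
-- def es_email_unico(p_uniemail: str, plista_usuarios) -> bool:
--     """Sort-then-binary-search: order the normalized emails and locate the
--     target with a hand-written bisect_left instead of hashing into a set."""
--     objetivo = p_uniemail.strip().lower()
--     emails = sorted(u["email"].strip().lower()
--                     for u in plista_usuarios
--                     if "email" in u and u["email"])
--     lo, hi = 0, len(emails)
--     while lo < hi:
--         mid = (lo + hi) // 2
--         if emails[mid] < objetivo:
--             lo = mid + 1
--         else:
--             hi = mid
--     return not (lo < len(emails) and emails[lo] == objetivo)
-- ===== Notes on version B (the rewrite author's own statement) =====
-- stated objective: alternative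
-- what changed: B replaces A's hash-set build + membership test by sorting the normalized emails and locating the target with a hand-written bisect_left binary search; correct because on a sorted list the lower-bound index holds the target iff it occurs at all.
import Mathlib
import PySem

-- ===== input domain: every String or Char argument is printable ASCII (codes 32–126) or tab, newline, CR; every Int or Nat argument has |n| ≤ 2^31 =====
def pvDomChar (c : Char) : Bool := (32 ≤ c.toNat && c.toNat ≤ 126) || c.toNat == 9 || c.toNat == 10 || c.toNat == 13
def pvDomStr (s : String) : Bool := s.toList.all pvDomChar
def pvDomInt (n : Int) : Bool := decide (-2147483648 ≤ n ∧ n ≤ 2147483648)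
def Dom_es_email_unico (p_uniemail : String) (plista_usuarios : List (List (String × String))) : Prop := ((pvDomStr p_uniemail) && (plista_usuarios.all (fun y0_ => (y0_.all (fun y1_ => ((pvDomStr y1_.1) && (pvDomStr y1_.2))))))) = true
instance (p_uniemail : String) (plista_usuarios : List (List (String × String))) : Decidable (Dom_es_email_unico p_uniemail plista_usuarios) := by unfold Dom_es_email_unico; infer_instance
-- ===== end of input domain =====

-- B replaces A's hash-set membership by sorting the normalized emails and a hand-written
-- bisect_left binary search (alternative algorithm, same result; sort costs O(n log n) vs A's O(n)).

-- ===== PORT A =====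
-- '"email" in u and u["email"]' (truthy string = nonempty)
def pvGuard (u : List (String × String)) : Bool :=
  (PySem.Dict.mk u).contains "email" && !((PySem.Dict.mk u).getD "email" "" == "")

-- 'u.get("email", "").strip().lower()'
def pvNorm (u : List (String × String)) : String :=
  PySem.Str.lower (PySem.Str.strip ((PySem.Dict.mk u).getD "email" ""))

def es_email_unico (p_uniemail : String) (plista_usuarios : List (List (String × String))) : Bool :=
  let email_normalizado := PySem.Str.lower (PySem.Str.strip p_uniemail)
  let emails_existentes : PySem.Set String :=
    plista_usuarios.foldl (fun s u => if pvGuard u then PySem.Set.add s (pvNorm u) else s) PySem.Set.empty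
  !(PySem.Set.contains emails_existentes email_normalizado)

-- ===== PORT B =====
-- Source B's 'while lo < hi' loop, transliterated with fuel (the loop runs at most len emails
-- halvings; indices stay in [0, len), so 'emails.getD mid ""' is exactly Python's emails[mid]).
def pvBisect (emails : List String) (objetivo : String) : Nat → Nat → Nat → Nat
  | 0, lo, _ => lo
  | fuel + 1, lo, hi =>
    if lo < hi then
      let mid := (lo + hi) / 2
      if emails.getD mid "" < objetivo then pvBisect emails objetivo fuel (mid + 1) hi
      else pvBisect emails objetivo fuel lo mid
    else lo

def es_email_unico_alt (p_uniemail : String) (plista_usuarios : List (List (String × String))) : Bool :=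
  let objetivo := PySem.Str.lower (PySem.Str.strip p_uniemail)
  let emails := PySem.List.sorted ((plista_usuarios.filter pvGuard).map
    (fun u => PySem.Str.lower (PySem.Str.strip ((PySem.Dict.mk u).getD "email" ""))))
    (fun x => x) false
  let lo := pvBisect emails objetivo emails.length 0 emails.length
  !(decide (lo < emails.length) && (emails.getD lo "" == objetivo))

-- ===== PRECONDITION & SPEC =====
def Spec_es_email_unico (p_uniemail : String) (plista_usuarios : List (List (String × String))) (out : Bool) : Prop := out = es_email_unico_alt p_uniemail plista_usuarios
instance (p_uniemail : String) (plista_usuarios : List (List (String × String))) (out : Bool) : Decidable (Spec_es_email_unico p_uniemail plista_usuarios out) := by unfold Spec_es_email_unico; infer_instance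

-- ===== CLAIM (what is proved, stated in full; the proofs are below) =====
def Claim_equal_es_email_unico : Prop := ∀ (p_uniemail : String) (plista_usuarios : List (List (String × String))), Dom_es_email_unico p_uniemail plista_usuarios → Spec_es_email_unico p_uniemail plista_usuarios (es_email_unico p_uniemail plista_usuarios)

-- ===== LEMMAS AND PROOFS =====
theorem beq_decide (a b : String) : (a == b) = decide (b = a) := by
  by_cases hab : a = b
  · subst hab; simp
  · simp [hab, Ne.symm hab]

-- A's set-building fold, characterised as an 'any' over the list.
theorem contains_foldl (l : List (List (String × String))) (s : PySem.Set String) (t : String) :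
    PySem.Set.contains (l.foldl (fun s u => if pvGuard u then PySem.Set.add s (pvNorm u) else s) s) t
      = (PySem.Set.contains s t || l.any (fun u => pvGuard u && (pvNorm u == t))) := by
  induction l generalizing s with
  | nil => simp
  | cons u l ih =>
    simp only [List.foldl_cons, List.any_cons, ih]
    by_cases h : pvGuard u = true
    · simp [h, beq_decide, Bool.or_assoc, Bool.or_comm, Bool.or_left_comm]
    · simp [Bool.not_eq_true] at h
      simp [h]

-- Loop invariant of bisect_left on a sorted String list: everything left of the result is < x,
-- everything from the result on is ≥ x.
theorem pvBisect_spec (xs : List String) (x : String)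
    (hs : xs.Pairwise (fun a b => a ≤ b)) :
    ∀ (fuel lo hi : Nat), lo ≤ hi → hi ≤ xs.length → hi - lo ≤ fuel →
      (∀ j (hj : j < xs.length), j < lo → xs[j] < x) →
      (∀ j (hj : j < xs.length), hi ≤ j → x ≤ xs[j]) →
      lo ≤ pvBisect xs x fuel lo hi ∧ pvBisect xs x fuel lo hi ≤ hi ∧
      (∀ j (hj : j < xs.length), j < pvBisect xs x fuel lo hi → xs[j] < x) ∧
      (∀ j (hj : j < xs.length), pvBisect xs x fuel lo hi ≤ j → x ≤ xs[j]) := by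
  intro fuel
  induction fuel with
  | zero =>
    intro lo hi hlh hhl hf hlow hhigh
    have : hi = lo := by omega
    subst this
    exact ⟨le_refl _, le_refl _, hlow, hhigh⟩
  | succ fuel ih =>
    intro lo hi hlh hhl hf hlow hhigh
    by_cases hlt : lo < hi
    · have hmid : (lo + hi) / 2 < xs.length := by omega
      have hmlo : lo ≤ (lo + hi) / 2 := by omega
      have hmhi : (lo + hi) / 2 < hi := by omega
      simp only [pvBisect, hlt, if_true]
      have hget : xs.getD ((lo + hi) / 2) "" = xs[(lo + hi) / 2] := List.getD_eq_getElem xs "" hmid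
      by_cases hc : xs.getD ((lo + hi) / 2) "" < x
      · simp only [hc, if_true]
        have h1 : ∀ j (hj : j < xs.length), j < (lo + hi) / 2 + 1 → xs[j] < x := by
          intro j hj hjm
          by_cases hjl : j < lo
          · exact hlow j hj hjl
          · have hle : xs[j] ≤ xs[(lo + hi) / 2] := by
              rcases Nat.lt_or_ge j ((lo + hi) / 2) with h | h
              · exact List.pairwise_iff_getElem.mp hs j _ hj hmid h
              · have : j = (lo + hi) / 2 := by omega
                subst this; exact le_refl _
            calc xs[j] ≤ xs[(lo + hi) / 2] := hle
              _ < x := by rw [← hget]; exact hc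
        have := ih ((lo + hi) / 2 + 1) hi (by omega) hhl (by omega) h1 hhigh
        exact ⟨by omega, this.2.1, this.2.2.1, this.2.2.2⟩
      · simp only [hc, if_false]
        have h2 : ∀ j (hj : j < xs.length), (lo + hi) / 2 ≤ j → x ≤ xs[j] := by
          intro j hj hjm
          have hx : x ≤ xs[(lo + hi) / 2] := by
            rw [← hget]; exact le_of_not_gt hc
          rcases Nat.lt_or_ge j ((lo + hi) / 2) with h | h
          · omega
          · rcases Nat.eq_or_lt_of_le h with h | h
            · subst h; exact hx
            · exact le_trans hx (List.pairwise_iff_getElem.mp hs _ j hmid hj h)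
        have := ih lo ((lo + hi) / 2) hmlo (by omega) (by omega) hlow h2
        exact ⟨this.1, by omega, this.2.2.1, this.2.2.2⟩
    · simp only [pvBisect, hlt, if_false]
      have : hi = lo := by omega
      subst this
      exact ⟨le_refl _, le_refl _, hlow, hhigh⟩

-- On a sorted list, Source B's final test 'lo < len and xs[lo] == x' decides membership.
theorem pvBisect_found (xs : List String) (x : String)
    (hs : xs.Pairwise (fun a b => a ≤ b)) :
    (decide (pvBisect xs x xs.length 0 xs.length < xs.length)
      && (xs.getD (pvBisect xs x xs.length 0 xs.length) "" == x)) = decide (x ∈ xs) := by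
  obtain ⟨-, hle, hlt, hge⟩ := pvBisect_spec xs x hs xs.length 0 xs.length
    (Nat.zero_le _) (le_refl _) (by omega)
    (by intro j hj h; omega) (by intro j hj h; omega)
  set r := pvBisect xs x xs.length 0 xs.length with hr
  by_cases hmem : x ∈ xs
  · obtain ⟨j, hj, hxj⟩ := List.mem_iff_getElem.mp hmem
    have hrj : r ≤ j := by
      by_contra h
      have := hlt j hj (by omega)
      rw [hxj] at this
      exact lt_irrefl x this
    have hrlen : r < xs.length := by omega
    have h1 : x ≤ xs[r] := hge r hrlen (le_refl _)
    have h2 : xs[r] ≤ x := by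
      rcases Nat.eq_or_lt_of_le hrj with h | h
      · subst h; rw [hxj]
      · rw [← hxj]; exact List.pairwise_iff_getElem.mp hs r j hrlen hj h
    have : xs[r] = x := le_antisymm h2 h1
    simp [hmem, hrlen, this]
  · simp only [hmem, decide_false]
    by_cases hrlen : r < xs.length
    · have : xs.getD r "" = xs[r] := List.getD_eq_getElem xs "" hrlen
      have hne : xs[r] ≠ x := by
        intro h; exact hmem (h ▸ List.getElem_mem hrlen)
      simp [hrlen, hne]
    · simp [hrlen]

-- ===== VERDICT (by name: the statement is the Claim_ definition above) =====
theorem es_email_unico_spec : Claim_equal_es_email_unico := by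
  intro p l _
  unfold Spec_es_email_unico es_email_unico es_email_unico_alt
  simp only [contains_foldl]
  set t := PySem.Str.lower (PySem.Str.strip p) with ht
  set emails := PySem.List.sorted ((l.filter pvGuard).map
    (fun u => PySem.Str.lower (PySem.Str.strip ((PySem.Dict.mk u).getD "email" "")))) (fun x => x) false with he
  have hsorted : emails.Pairwise (fun a b => a ≤ b) := by
    have := PySem.List.sorted_pairwise ((l.filter pvGuard).map
      (fun u => PySem.Str.lower (PySem.Str.strip ((PySem.Dict.mk u).getD "email" "")))) (fun x => x)
    simpa using this
  rw [pvBisect_found emails t hsorted]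
  have hmem : (t ∈ emails) ↔ l.any (fun u => pvGuard u && (pvNorm u == t)) = true := by
    rw [he, PySem.List.mem_sorted, List.mem_map]
    constructor
    · rintro ⟨u, hu, hft⟩
      rw [List.mem_filter] at hu
      refine List.any_eq_true.mpr ⟨u, hu.1, ?_⟩
      rw [Bool.and_eq_true, beq_iff_eq]
      exact ⟨hu.2, hft⟩
    · intro h
      obtain ⟨u, hu, hg⟩ := List.any_eq_true.mp h
      rw [Bool.and_eq_true, beq_iff_eq] at hg
      exact ⟨u, List.mem_filter.mpr ⟨hu, hg.1⟩, hg.2⟩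
  by_cases hm : t ∈ emails
  · simp [hm, hmem.mp hm, PySem.Set.contains, PySem.Set.empty]
  · have : ¬ l.any (fun u => pvGuard u && (pvNorm u == t)) = true := fun h => hm (hmem.mpr h)
    simp [hm, this, PySem.Set.contains, PySem.Set.empty]
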